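-- pv_equiv track=rewrite | github.com/lukerpotter/leetcode | 34 - Find First and Last Position of Element in Sorted Array.py | getRightPosition
-- ===== SOURCE A (Python) =====
-- def getRightPosition(nums, target):
--     left_idx = 0
--     right_idx = len(nums) - 1
--
--     # Find largest index that holds target
--     while left_idx <= right_idx:
--
--         mid = left_idx + ((right_idx - left_idx) // 2)
--
--         # If it matches:
--         if nums[mid] == target:
--             # If we're at the very last index, or the next element
--             # does not match our target, return this index. This is the
--             # right-most index that holds the target value.
--             if mid == len(nums) - 1 or nums[mid + 1] != target:
--                 return mid
--
--             left_idx = mid + 1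
--
--         # If the value at the mid is greater than our target, we need to
--         # narrow our window such that it ends to the left and eliminates
--         # mid from the search range.
--         elif nums[mid] > target:
--             right_idx = mid - 1
--         else:
--             left_idx = mid + 1
--
--     return -1
-- ===== SOURCE B (Python) =====
-- def getRightPosition(nums, target):
--     # Single reverse linear scan: the first match seen from the right end is
--     # the rightmost occurrence; no windowing or probing at all.
--     for i in range(len(nums) - 1, -1, -1):
--         if nums[i] == target:
--             return i
--     return -1
-- ===== Notes on version B (the rewrite author's own statement) =====
-- stated objective: simpler
-- what changed: Replaces A's binary search (window maintenance, equality branch, neighbor check) with a single reverse linear scan that returns the first match seen from the right end, or -1.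
-- outside the precondition, e.g. on getRightPosition([2, 1], 1): A returns -1, B returns 1
import Mathlib
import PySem

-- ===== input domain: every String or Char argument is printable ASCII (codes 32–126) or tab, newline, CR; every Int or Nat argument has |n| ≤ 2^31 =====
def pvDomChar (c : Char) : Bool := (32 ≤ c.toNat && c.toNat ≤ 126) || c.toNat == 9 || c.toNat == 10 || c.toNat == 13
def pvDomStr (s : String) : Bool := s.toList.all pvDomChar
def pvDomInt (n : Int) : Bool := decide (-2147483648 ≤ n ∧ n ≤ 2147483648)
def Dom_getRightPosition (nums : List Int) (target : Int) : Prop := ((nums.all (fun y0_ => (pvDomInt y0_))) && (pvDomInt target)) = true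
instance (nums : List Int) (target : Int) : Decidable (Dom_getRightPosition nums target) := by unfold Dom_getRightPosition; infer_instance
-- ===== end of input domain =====

-- B replaces A's binary search by a single reverse linear scan (first match seen
-- from the right end is the rightmost occurrence); equivalence is claimed on
-- sorted inputs (Pre_), binary search's natural domain.

-- `nums[i]` for both ports; every access in both loops has 0 ≤ i < len(nums), where
-- this equals Python's `nums[i]` exactly (the .getD 0 default is never reached).
def pvAt (nums : List Int) (i : Int) : Int := (PySem.List.pyGet? nums i).getD 0

-- termination facts for A's loop (cited by name in decreasing_by)
lemma pvDecA1 (left right : Int) (h : left ≤ right) :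
    (right + 1 - (left + PySem.Int.floordiv (right - left) 2 + 1)).toNat < (right + 1 - left).toNat := by
  have hb := PySem.Int.floordiv_two_mid_bounds (lo := 0) (hi := right - left) (by omega)
  rw [zero_add] at hb
  omega

lemma pvDecA2 (left right : Int) (h : left ≤ right) :
    (left + PySem.Int.floordiv (right - left) 2 - 1 + 1 - left).toNat < (right + 1 - left).toNat := by
  have hb := PySem.Int.floordiv_two_mid_bounds (lo := 0) (hi := right - left) (by omega)
  rw [zero_add] at hb
  omega

-- ===== PORT A =====
-- the `while left_idx <= right_idx` loop of A (state: left_idx, right_idx)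
def goA (nums : List Int) (target : Int) (left right : Int) : Int :=
  if hlr : left ≤ right then
    if pvAt nums (left + PySem.Int.floordiv (right - left) 2) = target then
      if left + PySem.Int.floordiv (right - left) 2 = (nums.length : Int) - 1 ∨
         pvAt nums (left + PySem.Int.floordiv (right - left) 2 + 1) ≠ target then
        left + PySem.Int.floordiv (right - left) 2
      else
        goA nums target (left + PySem.Int.floordiv (right - left) 2 + 1) right
    else if pvAt nums (left + PySem.Int.floordiv (right - left) 2) > target then
      goA nums target left (left + PySem.Int.floordiv (right - left) 2 - 1)
    else
      goA nums target (left + PySem.Int.floordiv (right - left) 2 + 1) right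
  else -1
termination_by (right + 1 - left).toNat
decreasing_by
  · exact pvDecA1 left right hlr
  · exact pvDecA2 left right hlr
  · exact pvDecA1 left right hlr

def getRightPosition (nums : List Int) (target : Int) : Int :=
  goA nums target 0 ((nums.length : Int) - 1)

-- ===== PORT B =====
-- the `for i in range(len(nums)-1, -1, -1)` reverse scan of B; the Nat argument
-- is the count of indices still to visit, so index n is visited at fuel n+1.
def goBr (nums : List Int) (target : Int) : Nat → Int
  | 0 => -1
  | n + 1 => if pvAt nums (n : Int) = target then (n : Int) else goBr nums target n

def getRightPosition_alt (nums : List Int) (target : Int) : Int :=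
  goBr nums target nums.length

-- ===== PRECONDITION & SPEC =====
-- Pre_ admits sorted lists (binary search's stated domain, "Element in Sorted
-- Array") and any list not containing the target (both provably return -1 there).
-- On an unsorted list that does contain the target both programs return, but
-- which index (or -1) a binary search lands on is an accident of its probing
-- order and neither value is specified; those inputs are excluded.
def Pre_getRightPosition (nums : List Int) (target : Int) : Prop :=
  List.Pairwise (· ≤ ·) nums ∨ target ∉ nums
instance (nums : List Int) (target : Int) : Decidable (Pre_getRightPosition nums target) := by
  unfold Pre_getRightPosition; infer_instance

def pvWitness_getRightPosition : List Int × Int := ([1, 2, 2, 3], 2)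

def Spec_getRightPosition (nums : List Int) (target : Int) (out : Int) : Prop := out = getRightPosition_alt nums target
instance (nums : List Int) (target : Int) (out : Int) : Decidable (Spec_getRightPosition nums target out) := by unfold Spec_getRightPosition; infer_instance

-- ===== CLAIM (what is proved, stated in full; the proofs are below) =====
def Claim_equal_getRightPosition : Prop := ∀ (nums : List Int) (target : Int), Dom_getRightPosition nums target → Pre_getRightPosition nums target → Spec_getRightPosition nums target (getRightPosition nums target)

-- ===== LEMMAS AND PROOFS =====

-- pvAt as a getElem, for in-range indices
lemma pvAt_eq_getElem (nums : List Int) {i : Int} (h0 : 0 ≤ i) (h : i < (nums.length : Int)) :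
    pvAt nums i = nums[i.toNat]'(by omega) := by
  unfold pvAt
  rw [PySem.List.pyGet?_of_nonneg nums h0, List.getElem?_eq_getElem (by omega)]
  rfl

-- sortedness as monotonicity of pvAt on in-range Int indices
lemma sorted_pvAt_le {nums : List Int} (hs : List.Pairwise (· ≤ ·) nums) {i j : Int}
    (h0 : 0 ≤ i) (hij : i ≤ j) (hj : j < (nums.length : Int)) :
    pvAt nums i ≤ pvAt nums j := by
  rw [pvAt_eq_getElem nums h0 (by omega), pvAt_eq_getElem nums (by omega) hj]
  rcases Nat.lt_or_ge i.toNat j.toNat with h | h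
  · exact List.pairwise_iff_getElem.mp hs _ _ _ _ h
  · have : i.toNat = j.toNat := by omega
    simp [this]

-- the common characterisation: r is the rightmost index holding target, or -1 if absent
def GoodR (nums : List Int) (target r : Int) : Prop :=
  (r = -1 ∧ ∀ i : Int, 0 ≤ i → i < (nums.length : Int) → pvAt nums i ≠ target) ∨
  (0 ≤ r ∧ r < (nums.length : Int) ∧ pvAt nums r = target ∧
    ∀ i : Int, r < i → i < (nums.length : Int) → pvAt nums i ≠ target)

lemma GoodR_unique {nums : List Int} {target r1 r2 : Int}
    (h1 : GoodR nums target r1) (h2 : GoodR nums target r2) : r1 = r2 := by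
  rcases h1 with ⟨e1, n1⟩ | ⟨l1, u1, v1, n1⟩ <;> rcases h2 with ⟨e2, n2⟩ | ⟨l2, u2, v2, n2⟩
  · omega
  · exact absurd v2 (n1 _ l2 u2)
  · exact absurd v1 (n2 _ l1 u1)
  · by_contra hne
    rcases lt_or_gt_of_ne hne with h | h
    · exact n1 _ h u2 v2
    · exact n2 _ h u1 v1

-- A's loop lands on the rightmost occurrence (or -1), given its invariants
lemma goA_good (nums : List Int) (target : Int) (hs : List.Pairwise (· ≤ ·) nums) :
    ∀ m : Nat, ∀ left right : Int, (right + 1 - left).toNat = m →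
      0 ≤ left → right < (nums.length : Int) → left ≤ right + 1 →
      (∀ i : Int, 0 ≤ i → i < left → pvAt nums i ≤ target) →
      (∀ i : Int, right < i → i < (nums.length : Int) → pvAt nums i > target) →
      ((∃ i : Int, left ≤ i ∧ i ≤ right ∧ pvAt nums i = target) ∨
        (∀ i : Int, 0 ≤ i → i < (nums.length : Int) → pvAt nums i ≠ target)) →
      GoodR nums target (goA nums target left right) := by
  intro m
  induction m using Nat.strong_induction_on with
  | _ m ih =>
    intro left right hm h0 hrn hlr1 hL hR hP
    rw [goA]
    by_cases hlr : left ≤ right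
    · rw [dif_pos hlr]
      have hb := PySem.Int.floordiv_two_mid_bounds (lo := 0) (hi := right - left) (by omega)
      rw [zero_add] at hb
      set md := left + PySem.Int.floordiv (right - left) 2 with hmd
      have hmdl : left ≤ md := by omega
      have hmdr : md ≤ right := by omega
      have hmdn : md < (nums.length : Int) := by omega
      have hdecL : (right + 1 - (md + 1)).toNat < m := by clear hP hL hR; omega
      have hdecR : (md - 1 + 1 - left).toNat < m := by clear hP hL hR; omega
      by_cases heq : pvAt nums md = target
      · rw [if_pos heq]
        by_cases hret : md = (nums.length : Int) - 1 ∨ pvAt nums (md + 1) ≠ target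
        · rw [if_pos hret]
          -- return md: it is the rightmost occurrence
          refine Or.inr ⟨by omega, hmdn, heq, ?_⟩
          intro i hi hin
          rcases hret with hlast | hnext
          · omega
          · have h1 : pvAt nums (md + 1) > target := by
              have := sorted_pvAt_le hs (i := md) (j := md + 1) (by omega) (by omega) (by omega)
              rw [heq] at this; omega
            have h2 : pvAt nums (md + 1) ≤ pvAt nums i :=
              sorted_pvAt_le hs (by omega) (by omega) hin
            omega
        · rw [if_neg hret]
          push_neg at hret
          obtain ⟨hnl, hnv⟩ := hret
          -- nums[md] = nums[md+1] = target; the occurrence md+1 stays in the window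
          have hmd1r : md + 1 ≤ right := by
            by_contra hc
            have : md + 1 < (nums.length : Int) := by omega
            have := hR (md + 1) (by omega) this
            omega
          refine ih (right + 1 - (md + 1)).toNat hdecL (md + 1) right (rfl) (by omega) hrn (by omega) ?_ hR ?_
          · intro i hi hile
            calc pvAt nums i ≤ pvAt nums md := sorted_pvAt_le hs hi (by omega) hmdn
            _ = target := heq
          · exact Or.inl ⟨md + 1, le_refl _, hmd1r, hnv⟩
      · rw [if_neg heq]
        by_cases hgt : pvAt nums md > target
        · rw [if_pos hgt]
          -- shrink right: everything from md on is > target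
          refine ih (md - 1 + 1 - left).toNat hdecR left (md - 1) (rfl) h0 (by omega) (by omega) hL ?_ ?_
          · intro i hi hin
            have := sorted_pvAt_le hs (i := md) (j := i) (by omega) (by omega) hin
            omega
          · rcases hP with ⟨j, hjl, hjr, hjv⟩ | habs
            · refine Or.inl ⟨j, hjl, ?_, hjv⟩
              by_contra hc
              have := sorted_pvAt_le hs (i := md) (j := j) (by omega) (by omega) (by omega)
              omega
            · exact Or.inr habs
        · rw [if_neg hgt]
          -- nums[md] < target: shrink left
          refine ih (right + 1 - (md + 1)).toNat hdecL (md + 1) right (rfl) (by omega) hrn (by omega) ?_ hR ?_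
          · intro i hi hile
            have := sorted_pvAt_le hs (i := i) (j := md) hi (by omega) hmdn
            omega
          · rcases hP with ⟨j, hjl, hjr, hjv⟩ | habs
            · refine Or.inl ⟨j, ?_, hjr, hjv⟩
              by_contra hc
              have := sorted_pvAt_le hs (i := j) (j := md) (by omega) (by omega) hmdn
              omega
            · exact Or.inr habs
    · rw [dif_neg hlr]
      -- window empty: target absent
      refine Or.inl ⟨rfl, ?_⟩
      rcases hP with ⟨j, hjl, hjr, _⟩ | habs
      · omega
      · exact habs

-- B's reverse scan returns the last occurrence (needs no sortedness);
-- invariant: every already-visited index i ≥ k misses target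
lemma goBr_good (nums : List Int) (target : Int) :
    ∀ k : Nat, k ≤ nums.length →
      (∀ i : Int, (k : Int) ≤ i → i < (nums.length : Int) → pvAt nums i ≠ target) →
      GoodR nums target (goBr nums target k) := by
  intro k
  induction k with
  | zero =>
    intro _ hmiss
    exact Or.inl ⟨rfl, fun i h1 h2 => hmiss i (by omega) h2⟩
  | succ n ih =>
    intro hle hmiss
    rw [goBr]
    by_cases h : pvAt nums (n : Int) = target
    · rw [if_pos h]
      exact Or.inr ⟨by omega, by omega, h, fun i h1 h2 => hmiss i (by omega) h2⟩
    · rw [if_neg h]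
      refine ih (by omega) ?_
      intro i h1 h2
      by_cases hi : i = (n : Int)
      · rw [hi]; exact h
      · exact hmiss i (by omega) h2

-- A's result satisfies the characterisation
lemma getRightPosition_good (nums : List Int) (target : Int)
    (hs : List.Pairwise (· ≤ ·) nums) : GoodR nums target (getRightPosition nums target) := by
  unfold getRightPosition
  refine goA_good nums target hs _ 0 ((nums.length : Int) - 1) rfl (by omega) (by omega) (by omega)
    (by intro i h1 h2; omega) (by intro i h1 h2; omega) ?_
  by_cases hex : ∃ i : Int, 0 ≤ i ∧ i < (nums.length : Int) ∧ pvAt nums i = target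
  · obtain ⟨i, h1, h2, h3⟩ := hex
    exact Or.inl ⟨i, h1, by omega, h3⟩
  · push_neg at hex
    exact Or.inr fun i h1 h2 => hex i h1 h2

-- B's result satisfies the characterisation
lemma getRightPosition_alt_good (nums : List Int) (target : Int) :
    GoodR nums target (getRightPosition_alt nums target) := by
  unfold getRightPosition_alt
  exact goBr_good nums target nums.length (le_refl _) (by intro i h1 h2; omega)

-- if the target occurs nowhere (as a pvAt value in range), A's loop returns -1
lemma goA_neg (nums : List Int) (target : Int)
    (hmiss : ∀ i : Int, 0 ≤ i → i < (nums.length : Int) → pvAt nums i ≠ target) :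
    ∀ m : Nat, ∀ left right : Int, (right + 1 - left).toNat = m →
      0 ≤ left → right < (nums.length : Int) →
      goA nums target left right = -1 := by
  intro m
  induction m using Nat.strong_induction_on with
  | _ m ih =>
    intro left right hm h0 hrn
    rw [goA]
    by_cases hlr : left ≤ right
    · rw [dif_pos hlr]
      have hb := PySem.Int.floordiv_two_mid_bounds (lo := 0) (hi := right - left) (by omega)
      rw [zero_add] at hb
      set md := left + PySem.Int.floordiv (right - left) 2 with hmd
      have hne : pvAt nums md ≠ target := hmiss md (by omega) (by omega)
      rw [if_neg hne]
      by_cases hgt : pvAt nums md > target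
      · rw [if_pos hgt]
        exact ih _ (by omega) left (md - 1) rfl h0 (by omega)
      · rw [if_neg hgt]
        exact ih _ (by omega) (md + 1) right rfl (by omega) hrn
    · rw [dif_neg hlr]

-- target ∉ nums ⇒ no in-range index holds it (pvAt's default is never consulted in range)
lemma miss_of_not_mem {nums : List Int} {target : Int} (hnm : target ∉ nums) :
    ∀ i : Int, 0 ≤ i → i < (nums.length : Int) → pvAt nums i ≠ target := by
  intro i h1 h2 hv
  rw [pvAt_eq_getElem nums h1 h2] at hv
  exact hnm (hv ▸ List.getElem_mem _)

-- ===== VERDICT (by name: the statement is the Claim_ definition above) =====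
theorem getRightPosition_spec : Claim_equal_getRightPosition := by
  intro nums target _hdom hpre
  unfold Spec_getRightPosition
  rcases hpre with hs | hnm
  · exact GoodR_unique (getRightPosition_good nums target hs) (getRightPosition_alt_good nums target)
  · have hmiss := miss_of_not_mem hnm
    have hA : getRightPosition nums target = -1 :=
      goA_neg nums target hmiss _ 0 ((nums.length : Int) - 1) rfl (by omega) (by omega)
    have hB : getRightPosition_alt nums target = -1 :=
      GoodR_unique (getRightPosition_alt_good nums target) (Or.inl ⟨rfl, hmiss⟩)
    rw [hA, hB]
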